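-- pv_equiv track=rewrite | github.com/harryila/Q1 | paper/scripts/data_prep/build_detection_data.py | order_sections_by_filing
-- ===== SOURCE A (Python) =====
-- def order_sections_by_filing(section_ids, section_order):
--     """Return unique section ids in the filing order defined by sections.csv."""
--     seen = set()
--     ordered = []
--     for sec_id in section_ids:
--         sec_id = (sec_id or "").strip()
--         if not sec_id or sec_id in seen:
--             continue
--         seen.add(sec_id)
--         ordered.append(sec_id)
--
--     return sorted(
--         ordered,
--         key=lambda sec_id: (section_order.get(sec_id, float("inf")), sec_id),
--     )
-- ===== SOURCE B (Python) =====
-- def order_sections_by_filing(section_ids, section_order):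
--     """Return unique section ids in the filing order defined by sections.csv."""
--     unique = {}
--     for raw in section_ids:
--         sec_id = (raw or "").strip()
--         if sec_id:
--             unique.setdefault(sec_id, None)
--     present = sorted((s for s in unique if s in section_order),
--                      key=lambda s: (section_order[s], s))
--     absent = sorted(s for s in unique if s not in section_order)
--     return present + absent
-- ===== Notes on version B (the rewrite author's own statement) =====
-- stated objective: alternative
-- what changed: Replaces A's single sort with a combined (order-or-inf, id) key and float('inf') sentinel by a dict-based dedup plus an explicit partition of the unique ids into present/absent keys of section_order, sorted separately and concatenated.
import Mathlib
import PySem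

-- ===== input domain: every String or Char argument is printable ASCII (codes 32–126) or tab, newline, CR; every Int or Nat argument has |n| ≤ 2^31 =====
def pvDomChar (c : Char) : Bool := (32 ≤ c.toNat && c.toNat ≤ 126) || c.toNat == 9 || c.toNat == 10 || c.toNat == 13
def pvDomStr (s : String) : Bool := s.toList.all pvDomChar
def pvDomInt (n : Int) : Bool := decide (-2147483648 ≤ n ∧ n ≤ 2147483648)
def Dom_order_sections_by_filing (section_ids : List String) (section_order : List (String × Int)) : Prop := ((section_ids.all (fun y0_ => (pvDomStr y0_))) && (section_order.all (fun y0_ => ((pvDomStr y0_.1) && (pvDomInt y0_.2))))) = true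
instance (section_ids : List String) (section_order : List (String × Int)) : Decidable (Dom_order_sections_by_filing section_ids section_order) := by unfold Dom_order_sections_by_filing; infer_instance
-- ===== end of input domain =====

-- B replaces A's single combined-key sort (with a float('inf') sentinel) by a partition of the
-- deduplicated ids into present/absent keys of section_order and two separate sorts (alternative
-- decomposition; no speed claim).

-- ===== PORT A =====
-- the dedup loop body of A ('seen' set + 'ordered' list)
def pvStepA (st : PySem.Set String × List String) (raw : String) : PySem.Set String × List String :=
  let sec_id := PySem.Str.strip raw
  if sec_id = "" ∨ PySem.Set.contains st.1 sec_id then st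
  else (PySem.Set.add st.1 sec_id, st.2 ++ [sec_id])

-- float('inf') in the sort key is ported as the Int sentinel 2^32 = 4294967296: exact on
-- Dom_order_sections_by_filing, where every dict value has |v| ≤ 2^31 < 2^32.
def order_sections_by_filing (section_ids : List String) (section_order : List (String × Int)) : List String :=
  let st := section_ids.foldl pvStepA (PySem.Set.empty, [])
  PySem.List.sorted2 st.2
    (fun sec_id => (PySem.Dict.mk section_order).getD sec_id 4294967296)
    (fun sec_id => sec_id)

-- ===== PORT B =====
-- the dedup loop body of B ('unique' dict via setdefault)
def pvStepB (u : PySem.Dict String (Option Unit)) (raw : String) : PySem.Dict String (Option Unit) :=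
  let sec_id := PySem.Str.strip raw
  if sec_id = "" then u else u.setdefault sec_id none

-- 'section_order[s]' is only evaluated on keys s the filter has shown present, so it is ported as
-- getD with an arbitrary default 0 (never used).
def order_sections_by_filing_alt (section_ids : List String) (section_order : List (String × Int)) : List String :=
  let unique := section_ids.foldl pvStepB PySem.Dict.empty
  let d := PySem.Dict.mk section_order
  let present := PySem.List.sorted2 (unique.keys.filter (fun s => d.contains s))
      (fun s => d.getD s 0) (fun s => s)
  let absent := PySem.List.sorted (unique.keys.filter (fun s => !d.contains s)) (fun s => s)
  present ++ absent

-- ===== PRECONDITION & SPEC =====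
def Spec_order_sections_by_filing (section_ids : List String) (section_order : List (String × Int)) (out : List String) : Prop := out = order_sections_by_filing_alt section_ids section_order
instance (section_ids : List String) (section_order : List (String × Int)) (out : List String) : Decidable (Spec_order_sections_by_filing section_ids section_order out) := by unfold Spec_order_sections_by_filing; infer_instance

-- ===== CLAIM (what is proved, stated in full; the proofs are below) =====
def Claim_equal_order_sections_by_filing : Prop := ∀ (section_ids : List String) (section_order : List (String × Int)), Dom_order_sections_by_filing section_ids section_order → Spec_order_sections_by_filing section_ids section_order (order_sections_by_filing section_ids section_order)

-- ===== LEMMAS AND PROOFS =====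

-- the stripped, nonempty ids in input order
def pvStrips (section_ids : List String) : List String :=
  (section_ids.map PySem.Str.strip).filter (fun s => !decide (s = ""))

-- A's dedup loop keeps 'seen' and 'ordered' equal, and both are a running Set.add fold
theorem pvStepA_fold (ids : List String) (s : List String) :
    ids.foldl pvStepA (s, s) =
      ((pvStrips ids).foldl PySem.Set.add s, (pvStrips ids).foldl PySem.Set.add s) := by
  induction ids generalizing s with
  | nil => simp [pvStrips]
  | cons x t ih =>
    by_cases hx : PySem.Str.strip x = ""
    · simpa [pvStrips, pvStepA, hx] using ih s
    · by_cases hm : PySem.Str.strip x ∈ s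
      · have hadd : PySem.Set.add s (PySem.Str.strip x) = s := PySem.Set.add_of_mem hm
        simpa [pvStrips, pvStepA, hx, hm, hadd] using ih s
      · have hadd := PySem.Set.add_of_not_mem hm
        simpa [pvStrips, pvStepA, hx, hm, hadd] using ih (s ++ [PySem.Str.strip x])

-- B's dedup dict has the same keys as A's running set
theorem pvStepB_fold (ids : List String) (u : PySem.Dict String (Option Unit)) :
    (ids.foldl pvStepB u).keys = (pvStrips ids).foldl PySem.Set.add u.keys := by
  induction ids generalizing u with
  | nil => simp [pvStrips]
  | cons x t ih =>
    by_cases hx : PySem.Str.strip x = ""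
    · simpa [pvStrips, pvStepB, hx] using ih u
    · have hkeys : (u.setdefault (PySem.Str.strip x) none).keys =
          PySem.Set.add u.keys (PySem.Str.strip x) := by
        rw [PySem.Dict.keys_setdefault]
        by_cases hm : PySem.Str.strip x ∈ u.keys
        · rw [if_pos ((PySem.Dict.contains_iff_mem_keys _ _).mpr hm),
              PySem.Set.add_of_mem hm]
        · rw [if_neg (fun h => hm ((PySem.Dict.contains_iff_mem_keys _ _).mp h)),
              PySem.Set.add_of_not_mem hm]
      simpa [pvStrips, pvStepB, hx, hkeys] using ih (u.setdefault (PySem.Str.strip x) none)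

-- sorted2 with LinearOrder keys is sorted with the lexicographic key
theorem pv_sorted2_eq_sorted_lex {α κ₁ κ₂ : Type} [LinearOrder κ₁] [LinearOrder κ₂]
    (xs : List α) (k1 : α → κ₁) (k2 : α → κ₂) :
    PySem.List.sorted2 xs k1 k2 = PySem.List.sorted xs (fun x => toLex (k1 x, k2 x)) := by
  rw [PySem.List.sorted_eq_foldl_insertBy]
  unfold PySem.List.sorted2
  simp only [if_neg (by decide : ¬(false = true))]
  congr 1
  funext acc x
  congr 1
  funext a b
  rcases lt_trichotomy (k1 a) (k1 b) with h | h | h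
  · simp [Prod.Lex.lt_iff, h]
  · simp [Prod.Lex.lt_iff, h]
  · simp [Prod.Lex.lt_iff, h, not_lt_of_gt h, ne_of_gt h]

-- the heart: a single lex sort with an ∞-sentinel equals present-sort ++ absent-sort
theorem pv_main (so : List (String × Int)) (U : List String) (hnd : U.Nodup)
    (hdom : ∀ p ∈ so, pvDomInt p.2 = true) :
    PySem.List.sorted U (fun s => toLex ((PySem.Dict.mk so).getD s 4294967296, s)) =
      PySem.List.sorted ((U.filter (fun s => (PySem.Dict.mk so).contains s)))
          (fun s => toLex ((PySem.Dict.mk so).getD s 0, s)) ++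
        PySem.List.sorted (U.filter (fun s => !(PySem.Dict.mk so).contains s)) (fun s => s) := by
  set d := PySem.Dict.mk so with hdm
  have hcont : ∀ s, d.contains s = true → ∃ v, d.get? s = some v ∧ v < 4294967296 := by
    intro s hs
    have h1 : (d.get? s).isSome := by rw [← PySem.Dict.contains_eq_isSome_get?]; exact hs
    obtain ⟨v, hv⟩ := Option.isSome_iff_exists.mp h1
    refine ⟨v, hv, ?_⟩
    have hmem : (s, v) ∈ d.items := PySem.Dict.mem_items_of_get?_eq_some d hv
    have := hdom (s, v) hmem
    simp only [pvDomInt, decide_eq_true_eq] at this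
    omega
  apply PySem.List.sorted_eq_of_perm_of_pairwise_lt
  · exact ((PySem.List.sorted_perm _ _ _).append (PySem.List.sorted_perm _ _ _)).trans
      (List.filter_append_perm _ U)
  · rw [List.pairwise_append]
    refine ⟨?_, ?_, ?_⟩
    · -- within the present block
      have hp := PySem.List.sorted_pairwise (U.filter (fun s => d.contains s))
        (fun s => toLex (d.getD s 0, s))
      have hnds : (PySem.List.sorted (U.filter (fun s => d.contains s))
          (fun s => toLex (d.getD s 0, s))).Pairwise (· ≠ ·) :=
        (PySem.List.sorted_perm _ _ _).symm.nodup (hnd.filter _)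
      refine List.Pairwise.imp_of_mem ?_ (hp.and hnds)
      intro a b ha hb hab
      have haP := ((List.mem_filter).mp ((PySem.List.mem_sorted _ _ _ _).mp ha)).2
      have hbP := ((List.mem_filter).mp ((PySem.List.mem_sorted _ _ _ _).mp hb)).2
      obtain ⟨va, hva, -⟩ := hcont a haP
      obtain ⟨vb, hvb, -⟩ := hcont b hbP
      have h1 := hab.1
      rw [PySem.Dict.getD_of_get?_eq_some d 0 hva, PySem.Dict.getD_of_get?_eq_some d 0 hvb] at h1
      rw [PySem.Dict.getD_of_get?_eq_some d 4294967296 hva,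
          PySem.Dict.getD_of_get?_eq_some d 4294967296 hvb]
      refine lt_of_le_of_ne h1 (fun h => hab.2 ?_)
      have := (Prod.mk.injEq _ _ _ _).mp (toLex_inj.mp h)
      exact this.2
    · -- within the absent block
      have hp := PySem.List.sorted_pairwise (U.filter (fun s => !d.contains s)) (fun s => s)
      have hnds : (PySem.List.sorted (U.filter (fun s => !d.contains s))
          (fun s => s)).Pairwise (· ≠ ·) :=
        (PySem.List.sorted_perm _ _ _).symm.nodup (hnd.filter _)
      refine List.Pairwise.imp_of_mem ?_ (hp.and hnds)
      intro a b ha hb hab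
      have haQ := ((List.mem_filter).mp ((PySem.List.mem_sorted _ _ _ _).mp ha)).2
      have hbQ := ((List.mem_filter).mp ((PySem.List.mem_sorted _ _ _ _).mp hb)).2
      rw [Bool.not_eq_true'] at haQ hbQ
      rw [PySem.Dict.getD_of_not_contains d _ haQ, PySem.Dict.getD_of_not_contains d _ hbQ]
      rw [Prod.Lex.lt_iff]
      exact Or.inr ⟨rfl, lt_of_le_of_ne hab.1 hab.2⟩
    · -- present before absent
      intro a ha b hb
      have haP := ((List.mem_filter).mp ((PySem.List.mem_sorted _ _ _ _).mp ha)).2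
      have hbQ := ((List.mem_filter).mp ((PySem.List.mem_sorted _ _ _ _).mp hb)).2
      rw [Bool.not_eq_true'] at hbQ
      obtain ⟨va, hva, hlt⟩ := hcont a haP
      rw [PySem.Dict.getD_of_get?_eq_some d _ hva, PySem.Dict.getD_of_not_contains d _ hbQ]
      rw [Prod.Lex.lt_iff]
      exact Or.inl hlt

theorem order_sections_by_filing_spec : Claim_equal_order_sections_by_filing := by
  intro ids so hdom
  unfold Spec_order_sections_by_filing
  simp only [order_sections_by_filing, order_sections_by_filing_alt]
  have hfold : ids.foldl pvStepA (PySem.Set.empty, []) =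
      ((pvStrips ids).foldl PySem.Set.add [], (pvStrips ids).foldl PySem.Set.add []) :=
    pvStepA_fold ids []
  have hkeys : (ids.foldl pvStepB PySem.Dict.empty).keys =
      (pvStrips ids).foldl PySem.Set.add [] :=
    pvStepB_fold ids PySem.Dict.empty
  rw [hfold, hkeys, pv_sorted2_eq_sorted_lex, pv_sorted2_eq_sorted_lex]
  have hnd : ((pvStrips ids).foldl PySem.Set.add []).Nodup := by
    rw [← PySem.Set.ofList_eq_foldl]
    exact PySem.Set.nodup_ofList _
  simp only [Dom_order_sections_by_filing, Bool.and_eq_true, List.all_eq_true] at hdom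
  exact pv_main so _ hnd (fun p hp => ((hdom.2 p hp).2))
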